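-- pv_equiv track=rewrite | github.com/Benedict3141592/Hillel_Homework_Groshev | HW_Lesson_6/HW_L6_Task_7.py | display_box
-- ===== SOURCE A (Python) =====
-- def display_box(width: int, height: int, character: str) -> str:
--     res = []
--
--     for index in range(height):
--         if index == 0 or index == height - 1:
--             res.append(f"{width * character}\n")
--         else:
--             res.append(f"{character}{(width - 2) * ' '}{character}\n")
--
--     return "".join(res)
-- ===== SOURCE B (Python) =====
-- def display_box(width: int, height: int, character: str) -> str:
--     if height <= 0:
--         return ""
--     top = f"{width * character}\n"
--     if height == 1:
--         return top
--     middle = f"{character}{(width - 2) * ' '}{character}\n"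
--     return top + middle * (height - 2) + top
-- ===== Notes on version B (the rewrite author's own statement) =====
-- stated objective: simpler
-- what changed: Replaces the per-row loop with direct string replication: top line, middle line repeated (height-2) times, top line again, with early returns for height<=0 and height==1.
import Mathlib
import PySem

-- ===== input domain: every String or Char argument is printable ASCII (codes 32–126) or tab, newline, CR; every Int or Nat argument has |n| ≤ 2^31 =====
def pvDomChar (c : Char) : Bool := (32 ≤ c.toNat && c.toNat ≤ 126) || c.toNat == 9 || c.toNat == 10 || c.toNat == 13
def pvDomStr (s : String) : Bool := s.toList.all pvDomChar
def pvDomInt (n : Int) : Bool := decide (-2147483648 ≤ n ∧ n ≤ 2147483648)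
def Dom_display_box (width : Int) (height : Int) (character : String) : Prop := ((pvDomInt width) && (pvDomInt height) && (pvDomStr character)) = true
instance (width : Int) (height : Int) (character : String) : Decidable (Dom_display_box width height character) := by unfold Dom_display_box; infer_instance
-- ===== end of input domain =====

-- B builds the box by string replication (top + middle*(height-2) + top) instead of A's per-row loop; objective: simpler.

-- ===== PORT A =====
-- strings handled as List Char; '"".join(res)' is res.flatten (joining with the empty separator)
def display_box (width : Int) (height : Int) (character : String) : String :=
  let res : List (List Char) :=
    (PySem.List.pyRange 0 height 1).foldl (fun res index =>
      if index == 0 || index == height - 1 then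
        res ++ [PySem.List.pyRepeat character.toList width ++ ['\n']]
      else
        res ++ [character.toList ++ PySem.List.pyRepeat [' '] (width - 2) ++ character.toList ++ ['\n']]) []
  String.ofList res.flatten

-- ===== PORT B =====
def display_box_alt (width : Int) (height : Int) (character : String) : String :=
  if height ≤ 0 then ""
  else
    let top := PySem.List.pyRepeat character.toList width ++ ['\n']
    if height == 1 then String.ofList top
    else
      let middle := character.toList ++ PySem.List.pyRepeat [' '] (width - 2) ++ character.toList ++ ['\n']
      String.ofList (top ++ PySem.List.pyRepeat middle (height - 2) ++ top)

-- ===== PRECONDITION & SPEC =====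
def Spec_display_box (width : Int) (height : Int) (character : String) (out : String) : Prop := out = display_box_alt width height character
instance (width : Int) (height : Int) (character : String) (out : String) : Decidable (Spec_display_box width height character out) := by unfold Spec_display_box; infer_instance

-- ===== CLAIM (what is proved, stated in full; the proofs are below) =====
def Claim_equal_display_box : Prop := ∀ (width : Int) (height : Int) (character : String), Dom_display_box width height character → Spec_display_box width height character (display_box width height character)

-- ===== LEMMAS AND PROOFS =====

-- ===== VERDICT (by name: the statement is the Claim_ definition above) =====
theorem display_box_spec : Claim_equal_display_box := by
  intro w h c _
  unfold Spec_display_box display_box display_box_alt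
  set top : List Char := PySem.List.pyRepeat c.toList w ++ ['\n'] with htop
  set mid : List Char := c.toList ++ PySem.List.pyRepeat [' '] (w - 2) ++ c.toList ++ ['\n'] with hmid
  have hfold : ∀ (l : List Int) (acc : List (List Char)),
      l.foldl (fun res index =>
        if index == 0 || index == h - 1 then res ++ [top] else res ++ [mid]) acc
        = acc ++ l.map (fun index => if index == 0 || index == h - 1 then top else mid) := by
    intro l
    induction l with
    | nil => intro acc; simp
    | cons x xs ih =>
      intro acc
      simp only [List.foldl_cons, List.map_cons]
      rw [ih]
      by_cases hx : (x == 0 || x == h - 1) = true <;> simp [hx]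
  simp only [hfold, List.nil_append]
  by_cases h0 : h ≤ 0
  · rw [PySem.List.pyRange_one_eq_nil h0]
    simp [h0]
  · push Not at h0
    by_cases h1 : h = 1
    · subst h1
      have : PySem.List.pyRange 0 1 1 = [0] := by decide
      rw [this]
      simp
    · have h2 : 2 ≤ h := by omega
      have hsplit : PySem.List.pyRange 0 h 1
          = PySem.List.pyRange 0 1 1 ++ PySem.List.pyRange 1 h 1 :=
        PySem.List.pyRange_one_append 0 1 h (by omega) (by omega)
      have hsplit2 : PySem.List.pyRange 1 h 1
          = PySem.List.pyRange 1 (h - 1) 1 ++ [h - 1] := by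
        have := PySem.List.pyRange_one_succ_right (a := 1) (b := h - 1) (by omega)
        have hh : h - 1 + 1 = h := by omega
        rw [hh] at this
        exact this
      have hr01 : PySem.List.pyRange 0 1 1 = [0] := by decide
      rw [hsplit, hsplit2, hr01]
      have hmidmap : (PySem.List.pyRange 1 (h - 1) 1).map
          (fun index => if index == 0 || index == h - 1 then top else mid)
          = List.replicate (h - 2).toNat mid := by
        rw [List.map_congr_left (g := fun _ => mid) ?_]
        · rw [List.map_const', PySem.List.length_pyRange_one]
          congr 1
          omega
        · intro x hx
          rw [PySem.List.mem_pyRange_one] at hx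
          have : ¬ (x == 0 || x == h - 1) = true := by
            simp only [Bool.or_eq_true, beq_iff_eq]
            omega
          simp [this]
      simp only [List.map_append, List.map_cons, List.map_nil, hmidmap]
      have hne1 : (h == 1) = false := by simp [h1]
      simp only [h0.not_ge, if_false, hne1, Bool.false_eq_true]
      have hf0 : ((0 : Int) == 0 || (0 : Int) == h - 1) = true := by simp
      have hfh : ((h - 1 : Int) == 0 || (h - 1 : Int) == h - 1) = true := by simp
      rw [hf0, hfh]
      simp only [if_true, List.flatten_append, List.flatten_cons, List.flatten_nil]
      have : PySem.List.pyRepeat mid (h - 2) = (List.replicate (h-2).toNat mid).flatten := rfl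
      rw [this]
      simp
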